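-- pv_equiv track=rewrite | github.com/marvinbarretto/openclaw | workspace/dispatch_batch_memory.py | summarize_batch
-- ===== SOURCE A (Python) =====
-- def summarize_batch(batch):
--     """Return a compact human summary for a batch."""
--     items = list((batch or {}).get("items", {}).values())
--     total = len(items)
--     counts = {}
--     for item in items:
--         status = item.get("status", "unknown")
--         counts[status] = counts.get(status, 0) + 1
--
--     ordered_statuses = [
--         "proposed", "approved", "picked_up", "completed",
--         "blocked", "failed", "rejected", "timeout",
--     ]
--     parts = []
--     for status in ordered_statuses:
--         count = counts.get(status, 0)
--         if count:
--             parts.append(f"{count} {status}")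
--
--     summary = f"{total} tasks"
--     if parts:
--         summary += ": " + ", ".join(parts)
--     return summary
-- ===== SOURCE B (Python) =====
-- def _rle(xs):
--     """Run-length encode xs, keeping the reversed encoding with the current run in front."""
--     out = []
--     for x in xs:
--         if out and out[0][0] == x:
--             out[0] = (x, out[0][1] + 1)
--         else:
--             out.insert(0, (x, 1))
--     return out[::-1]
--
--
-- def summarize_batch(batch):
--     """Sort-then-group: order the known statuses by rank, then run-length encode."""
--     items = list((batch or {}).get("items", {}).values())
--     ordered_statuses = [
--         "proposed", "approved", "picked_up", "completed",
--         "blocked", "failed", "rejected", "timeout",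
--     ]
--     rank = {s: i for i, s in enumerate(ordered_statuses)}
--     known = sorted((s for s in (item.get("status", "unknown") for item in items)
--                     if s in rank),
--                    key=lambda s: rank[s])
--     parts = [f"{n} {s}" for s, n in _rle(known)]
--     summary = f"{len(items)} tasks"
--     if parts:
--         summary += ": " + ", ".join(parts)
--     return summary
-- ===== Notes on version B (the rewrite author's own statement) =====
-- stated objective: alternative
-- what changed: Replaces A's counting dict plus per-status lookup loop with a sort-then-group algorithm: the known statuses are sorted by their rank in the fixed order and a run-length encoding of the sorted list yields the (status, count) parts directly.
import Mathlib
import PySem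

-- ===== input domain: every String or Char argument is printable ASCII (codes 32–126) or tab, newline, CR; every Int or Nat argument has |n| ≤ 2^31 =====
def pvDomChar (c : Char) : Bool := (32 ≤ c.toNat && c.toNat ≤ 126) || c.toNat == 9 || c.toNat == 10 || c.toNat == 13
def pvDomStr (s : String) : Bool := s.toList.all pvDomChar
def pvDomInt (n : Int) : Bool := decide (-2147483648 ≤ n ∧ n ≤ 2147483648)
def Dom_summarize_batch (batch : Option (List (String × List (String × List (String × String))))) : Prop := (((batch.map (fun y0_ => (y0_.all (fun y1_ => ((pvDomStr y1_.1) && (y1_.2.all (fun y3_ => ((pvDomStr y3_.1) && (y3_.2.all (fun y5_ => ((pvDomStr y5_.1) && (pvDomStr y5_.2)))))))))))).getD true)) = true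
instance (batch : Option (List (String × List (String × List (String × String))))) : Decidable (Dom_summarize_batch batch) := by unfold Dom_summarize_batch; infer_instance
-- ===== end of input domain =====

-- B replaces A's counting dict + per-status lookup loop with sort-by-rank + run-length
-- encoding of the sorted known statuses (alternative algorithm, not claimed faster).

-- ===== PORT A =====
def summarize_batch (batch : Option (List (String × List (String × List (String × String))))) : String :=
  let items := (PySem.Dict.ofList ((PySem.Dict.ofList (batch.getD [])).getD "items" [])).values
  let total : Int := (items.length : Int)
  let counts := items.foldl
    (fun (d : PySem.Dict String Int) item =>
      d.modify ((PySem.Dict.ofList item).getD "status" "unknown") 0 (· + 1))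
    PySem.Dict.empty
  let ordered_statuses := ["proposed", "approved", "picked_up", "completed",
                           "blocked", "failed", "rejected", "timeout"]
  let parts := ordered_statuses.foldl
    (fun (ps : List String) status =>
      let count := counts.getD status 0
      if count ≠ 0 then ps ++ [PySem.Int.toStr count ++ " " ++ status] else ps)
    []
  let summary := PySem.Int.toStr total ++ " tasks"
  if parts ≠ [] then summary ++ ": " ++ PySem.Str.join ", " parts else summary

-- ===== PORT B =====
-- B-side helpers: the fixed status order, the rank dict, one item's status,
-- the sort key, and the run-length encoder (port of _rle; counts are Python ints → Int)
def pvS : List String :=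
  ["proposed", "approved", "picked_up", "completed",
   "blocked", "failed", "rejected", "timeout"]

def pvRank : PySem.Dict String Int :=
  PySem.Dict.ofList ((PySem.List.enumerate pvS).map (fun p => (p.2, p.1)))

def pvStatus (item : List (String × String)) : String :=
  (PySem.Dict.ofList item).getD "status" "unknown"

-- 'rank[s]' in the Python sort key is only applied to elements that passed the
-- 's in rank' filter, so the getD default is unreachable
def pvKey (s : String) : Int := pvRank.getD s 0

def pvRleStep (out : List (String × Int)) (x : String) : List (String × Int) :=
  match out with
  | (y, n) :: rest => if y == x then (x, n + 1) :: rest else (x, 1) :: (y, n) :: rest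
  | [] => [(x, 1)]

def pvRle (xs : List String) : List (String × Int) := (xs.foldl pvRleStep []).reverse

def summarize_batch_alt (batch : Option (List (String × List (String × List (String × String))))) : String :=
  let items := (PySem.Dict.ofList ((PySem.Dict.ofList (batch.getD [])).getD "items" [])).values
  let known := PySem.List.sorted
    ((items.map pvStatus).filter (fun s => pvRank.contains s)) pvKey false
  let parts := (pvRle known).map (fun p => PySem.Int.toStr p.2 ++ " " ++ p.1)
  let summary := PySem.Int.toStr (items.length : Int) ++ " tasks"
  if parts ≠ [] then summary ++ ": " ++ PySem.Str.join ", " parts else summary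

-- ===== PRECONDITION & SPEC =====
def Spec_summarize_batch (batch : Option (List (String × List (String × List (String × String))))) (out : String) : Prop := out = summarize_batch_alt batch
instance (batch : Option (List (String × List (String × List (String × String))))) (out : String) : Decidable (Spec_summarize_batch batch out) := by unfold Spec_summarize_batch; infer_instance

-- ===== CLAIM =====
def Claim_equal_summarize_batch : Prop := ∀ (batch : Option (List (String × List (String × List (String × String))))), Dom_summarize_batch batch → Spec_summarize_batch batch (summarize_batch batch)

-- ===== LEMMAS AND PROOFS =====

-- A's counting dict looked up at s is the plain count of s among the statuses
lemma pv_count_eq (items : List (List (String × String))) (s : String) :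
    (items.foldl
      (fun (d : PySem.Dict String Int) item =>
        d.modify ((PySem.Dict.ofList item).getD "status" "unknown") 0 (· + 1))
      PySem.Dict.empty).getD s 0
    = ((items.map pvStatus).count s : Int) := by
  have h : items.foldl
      (fun (d : PySem.Dict String Int) item =>
        d.modify ((PySem.Dict.ofList item).getD "status" "unknown") 0 (· + 1))
      PySem.Dict.empty
    = (items.map pvStatus).foldl (fun (d : PySem.Dict String Int) x => d.modify x 0 (· + 1))
      PySem.Dict.empty := by
    rw [List.foldl_map]; rfl
  rw [h, PySem.Dict.getD_foldl_modify_add_one]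
  simp [PySem.Dict.empty, PySem.Dict.getD, PySem.Dict.get?]

-- membership in the rank dict is membership in the ordered status list
lemma pv_rank_contains (s : String) : pvRank.contains s = pvS.contains s := by
  by_cases hs : s ∈ pvS
  · fin_cases hs <;> decide
  · have h2 : pvS.contains s = false := by simpa using hs
    rw [h2]
    simp only [pvS, List.mem_cons, List.not_mem_nil, or_false, not_or] at hs
    obtain ⟨n1, n2, n3, n4, n5, n6, n7, n8⟩ := hs
    have h : pvRank = PySem.Dict.mk
        [("proposed", 0), ("approved", 1), ("picked_up", 2), ("completed", 3),
         ("blocked", 4), ("failed", 5), ("rejected", 6), ("timeout", 7)] := by decide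
    rw [h]
    simp [PySem.Dict.contains_mk, beq_eq_false_iff_ne,
      Ne.symm n1, Ne.symm n2, Ne.symm n3, Ne.symm n4, Ne.symm n5, Ne.symm n6, Ne.symm n7, Ne.symm n8]

-- two permutation-equal lists, both nondecreasing under the key, with the key
-- injective on their elements, are the same list
lemma pv_perm_pairwise_eq (key : String → Int) :
    ∀ (l₁ l₂ : List String), l₁.Perm l₂ →
      l₁.Pairwise (fun a b => key a ≤ key b) → l₂.Pairwise (fun a b => key a ≤ key b) →
      (∀ a ∈ l₁, ∀ b ∈ l₁, key a = key b → a = b) → l₁ = l₂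
  | [], l₂, hp, _, _, _ => hp.nil_eq.symm ▸ rfl
  | a :: t, [], hp, _, _, _ => absurd hp (by simp)
  | a :: t, b :: t₂, hp, hpw1, hpw2, hinj => by
    have hab : a = b := by
      have hbmem : b ∈ a :: t := hp.symm.subset (List.mem_cons_self ..)
      rcases List.mem_cons.mp hbmem with h | h
      · exact h.symm
      · have hamem : a ∈ b :: t₂ := hp.subset (List.mem_cons_self ..)
        have h1 : key a ≤ key b := (List.pairwise_cons.mp hpw1).1 b h
        have h2 : key b ≤ key a := by
          rcases List.mem_cons.mp hamem with h' | h'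
          · exact h' ▸ le_refl _
          · exact (List.pairwise_cons.mp hpw2).1 a h'
        exact hinj a (List.mem_cons_self ..) b hbmem (le_antisymm h1 h2)
    subst hab
    have ht : t = t₂ :=
      pv_perm_pairwise_eq key t t₂ hp.cons_inv (List.pairwise_cons.mp hpw1).2
        (List.pairwise_cons.mp hpw2).2
        (fun x hx y hy h => hinj x (List.mem_cons_of_mem _ hx) y (List.mem_cons_of_mem _ hy) h)
    rw [ht]

-- the canonical sorted-by-rank arrangement of the known statuses: one block per status
def pvBlocks (S T : List String) : List String :=
  S.flatMap (fun s => List.replicate (T.count s) s)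

lemma pv_count_blocks (T : List String) (x : String) :
    ∀ (S : List String), S.Nodup →
      (pvBlocks S T).count x = if x ∈ S then T.count x else 0
  | [], _ => by simp [pvBlocks]
  | s :: S', hnd => by
    have ih := pv_count_blocks T x S' (List.nodup_cons.mp hnd).2
    rw [pvBlocks, List.flatMap_cons, List.count_append, List.count_replicate]
    rw [pvBlocks] at ih; rw [ih]
    by_cases hxs : x = s
    · subst hxs
      have : x ∉ S' := (List.nodup_cons.mp hnd).1
      simp [this]
    · have : ¬ (s = x) := fun h => hxs h.symm
      simp [hxs, this]

lemma pv_blocks_perm (S T : List String) (hnd : S.Nodup) :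
    (pvBlocks S T).Perm (T.filter (fun s => S.contains s)) := by
  rw [List.perm_iff_count]
  intro x
  rw [pv_count_blocks T x S hnd]
  by_cases hx : x ∈ S
  · rw [if_pos hx, List.count_filter]
    simp [hx]
  · rw [if_neg hx, eq_comm, List.count_eq_zero]
    intro hmem
    exact hx (by simpa using (List.mem_filter.mp hmem).2)

lemma pv_blocks_pairwise (key : String → Int) (T : List String) :
    ∀ (S : List String), S.Pairwise (fun a b => key a < key b) →
      (pvBlocks S T).Pairwise (fun a b => key a ≤ key b)
  | [], _ => by simp [pvBlocks]
  | s :: S', hm => by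
    rw [pvBlocks, List.flatMap_cons, List.pairwise_append]
    refine ⟨?_, pv_blocks_pairwise key T S' (List.pairwise_cons.mp hm).2, ?_⟩
    · exact List.pairwise_replicate.mpr (Or.inr (le_refl _))
    · intro a ha b hb
      have ha' : a = s := List.eq_of_mem_replicate ha
      obtain ⟨s', hs', hb'⟩ := List.mem_flatMap.mp hb
      have hb'' : b = s' := List.eq_of_mem_replicate hb'
      subst ha'; subst hb''
      exact le_of_lt ((List.pairwise_cons.mp hm).1 b hs')

-- the step only ever inspects the head of the accumulator
lemma pv_foldl_step_append :
    ∀ (l : List String) (g : String × Int) (t acc2 : List (String × Int)),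
      List.foldl pvRleStep ((g :: t) ++ acc2) l = List.foldl pvRleStep (g :: t) l ++ acc2
  | [], _, _, _ => rfl
  | x :: l, g, t, acc2 => by
    rw [List.foldl_cons, List.foldl_cons]
    show List.foldl pvRleStep (pvRleStep (g :: (t ++ acc2)) x) l = _
    rw [pvRleStep, pvRleStep]
    by_cases h : g.1 == x
    · simp only [h, if_pos]
      exact pv_foldl_step_append l (x, g.2 + 1) t acc2
    · simp only [h, if_neg, Bool.false_eq_true, not_false_iff]
      exact pv_foldl_step_append l (x, 1) (g :: t) acc2

lemma pv_foldl_step_replicate (s : String) (k : Int) :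
    ∀ (m : Nat), List.foldl pvRleStep [(s, k)] (List.replicate m s) = [(s, k + m)]
  | 0 => by simp
  | m + 1 => by
    rw [List.replicate_succ, List.foldl_cons]
    show List.foldl pvRleStep (pvRleStep [(s, k)] s) (List.replicate m s) = _
    rw [pvRleStep]
    simp only [BEq.refl, if_pos]
    rw [pv_foldl_step_replicate s (k + 1) m]
    push_cast
    ring_nf

lemma pv_rle_replicate_append (s : String) (rest : List String)
    (hr : ∀ y ∈ rest, y ≠ s) (n : Nat) (hn : 0 < n) :
    pvRle (List.replicate n s ++ rest) = (s, (n : Int)) :: pvRle rest := by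
  have hrep : List.foldl pvRleStep [] (List.replicate n s) = [(s, (n : Int))] := by
    obtain ⟨m, rfl⟩ := Nat.exists_eq_add_of_lt hn
    rw [Nat.zero_add, List.replicate_succ, List.foldl_cons]
    show List.foldl pvRleStep (pvRleStep [] s) (List.replicate m s) = _
    rw [pvRleStep, pv_foldl_step_replicate s 1 m]
    push_cast
    ring_nf
  rw [pvRle, List.foldl_append, hrep]
  rcases rest with _ | ⟨y, t⟩
  · simp [pvRle]
  · have hy : (s == y) = false :=
      beq_eq_false_iff_ne.mpr (fun h => hr y (List.mem_cons_self ..) h.symm)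
    rw [List.foldl_cons]
    show (List.foldl pvRleStep (pvRleStep [(s, (n : Int))] y) t).reverse = _
    rw [pvRleStep]
    simp only [hy, Bool.false_eq_true, if_neg, not_false_iff]
    rw [show ((y, (1 : Int)) :: [(s, (n : Int))]) = [(y, (1 : Int))] ++ [(s, (n : Int))] from rfl,
        pv_foldl_step_append t (y, 1) [] [(s, (n : Int))]]
    rw [List.reverse_append]
    rw [pvRle, List.foldl_cons]
    show _ = (s, (n : Int)) :: (List.foldl pvRleStep (pvRleStep [] y) t).reverse
    rw [pvRleStep]
    simp

lemma pv_rle_blocks (T : List String) :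
    ∀ (S : List String), S.Nodup →
      pvRle (pvBlocks S T)
        = (S.filter (fun s => T.count s != 0)).map (fun s => (s, (T.count s : Int)))
  | [], _ => by simp [pvBlocks, pvRle]
  | s :: S', hnd => by
    have ih := pv_rle_blocks T S' (List.nodup_cons.mp hnd).2
    rw [pvBlocks, List.flatMap_cons]
    by_cases hc : T.count s = 0
    · rw [hc]
      simp only [List.replicate_zero, List.nil_append]
      rw [pvBlocks] at ih; rw [ih, List.filter_cons]
      simp [hc]
    · have hr : ∀ y ∈ pvBlocks S' T, y ≠ s := by
        intro y hy
        obtain ⟨s', hs', hy'⟩ := List.mem_flatMap.mp hy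
        have : y = s' := List.eq_of_mem_replicate hy'
        subst this
        exact fun h => (List.nodup_cons.mp hnd).1 (h ▸ hs')
      rw [show List.flatMap (fun s => List.replicate (List.count s T) s) S' = pvBlocks S' T from rfl,
          pv_rle_replicate_append s (pvBlocks S' T) hr (T.count s) (Nat.pos_of_ne_zero hc),
          ih, List.filter_cons]
      simp [hc]

-- A's parts fold equals B's map over the run-length encoding of the sorted known statuses
lemma pv_parts_eq (T : List String) :
    pvS.foldl
      (fun (ps : List String) status =>
        if ((T.count status : Int)) ≠ 0
        then ps ++ [PySem.Int.toStr ((T.count status : Int)) ++ " " ++ status] else ps)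
      []
    = (pvRle (PySem.List.sorted (T.filter (fun s => pvRank.contains s)) pvKey false)).map
        (fun p => PySem.Int.toStr p.2 ++ " " ++ p.1) := by
  rw [List.filter_congr (fun x _ => pv_rank_contains x)]
  have hperm : (PySem.List.sorted (T.filter (fun s => pvS.contains s)) pvKey false).Perm
      (pvBlocks pvS T) :=
    (PySem.List.sorted_perm ..).trans (pv_blocks_perm pvS T (by decide)).symm
  have hsorted : PySem.List.sorted (T.filter (fun s => pvS.contains s)) pvKey false
      = pvBlocks pvS T := by
    refine pv_perm_pairwise_eq pvKey _ _ hperm (PySem.List.sorted_pairwise ..)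
      (pv_blocks_pairwise pvKey T pvS (by decide)) ?_
    have hSinj : ∀ a ∈ pvS, ∀ b ∈ pvS, pvKey a = pvKey b → a = b := by decide
    intro a ha b hb h
    have ha' : a ∈ pvS := by
      have := (List.mem_filter.mp ((PySem.List.mem_sorted ..).mp ha)).2
      simpa using this
    have hb' : b ∈ pvS := by
      have := (List.mem_filter.mp ((PySem.List.mem_sorted ..).mp hb)).2
      simpa using this
    exact hSinj a ha' b hb' h
  rw [hsorted, pv_rle_blocks T pvS (by decide), List.map_map,
      PySem.List.foldl_append_ite (p := fun status => ((T.count status : Int)) ≠ 0)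
        (f := fun status => PySem.Int.toStr ((T.count status : Int)) ++ " " ++ status)]
  have hpred : ∀ x ∈ pvS, (decide (((T.count x : Int)) ≠ 0)) = (T.count x != 0) := by
    intro x _
    simp only [bne]
    cases h : decide (List.count x T = 0) <;> simp_all
  rw [List.filter_congr hpred]
  simp [Function.comp]

-- ===== VERDICT =====
theorem summarize_batch_spec : Claim_equal_summarize_batch := by
  intro batch _
  unfold Spec_summarize_batch summarize_batch summarize_batch_alt
  simp only [pv_count_eq]
  rw [show (["proposed", "approved", "picked_up", "completed",
             "blocked", "failed", "rejected", "timeout"] : List String) = pvS from rfl,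
      pv_parts_eq]
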